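-- pv_equiv track=rewrite | github.com/Kegyi/polyglot_dev_atlas_ver2 | content/snippets/python/interview_lcci_16_18_pattern_matching.py | pattern_matching
-- ===== SOURCE A (Python) =====
-- def pattern_matching(pattern: str, value: str) -> bool:
--     if not pattern:
--         return value == ""
--
--     count_a = pattern.count("a")
--     count_b = pattern.count("b")
--
--     if count_a < count_b:
--         swapped = "".join("b" if c == "a" else "a" for c in pattern)
--         return pattern_matching(swapped, value)
--
--     if value == "":
--         return count_b == 0
--
--     n = len(value)
--     for len_a in range(0, n // count_a + 1):
--         rest = n - count_a * len_a
--         if count_b == 0: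
--             if rest != 0:
--                 continue
--             len_b = 0
--         else:
--             if rest % count_b != 0:
--                 continue
--             len_b = rest // count_b
--
--         pos = 0
--         a = None
--         b = None
--         ok = True
--         for ch in pattern:
--             if ch == "a":
--                 sub = value[pos:pos + len_a]
--                 if a is None:
--                     a = sub
--                 elif a != sub:
--                     ok = False
--                     break
--                 pos += len_a
--             else:
--                 sub = value[pos:pos + len_b]
--                 if b is None:
--                     b = sub
--                 elif b != sub:
--                     ok = False
--                     break
--                 pos += len_b
--         if ok and a != b:
--             return True
--     return False
-- ===== SOURCE B (Python) =====
-- def pattern_matching(pattern: str, value: str) -> bool: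
--     if not pattern:
--         return value == ""
--
--     count_a = pattern.count("a")
--     count_b = pattern.count("b")
--
--     if count_a < count_b:
--         flipped = "".join("b" if c == "a" else "a" for c in pattern)
--         return pattern_matching(flipped, value)
--
--     if value == "":
--         return count_b == 0
--
--     n = len(value)
--     return any(_fits(pattern, value, la, lb)
--                for la, lb in _length_pairs(n, count_a, count_b))
--
--
-- def _length_pairs(n, count_a, count_b):
--     pairs = []
--     for la in range(n // count_a + 1):
--         rest = n - count_a * la
--         if count_b == 0:
--             if rest == 0:
--                 pairs.append((la, 0))
--         elif rest % count_b == 0: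
--             pairs.append((la, rest // count_b))
--     return pairs
--
--
-- def _fits(pattern, value, la, lb):
--     # pass 1: extract the candidate substitutions at the first occurrences
--     a = b = None
--     pos = 0
--     for c in pattern:
--         if c == "a":
--             if a is None:
--                 a = value[pos:pos + la]
--             pos += la
--         else:
--             if b is None:
--                 b = value[pos:pos + lb]
--             pos += lb
--     # pass 2: rebuild the whole string from the candidates and compare
--     rebuilt = "".join(a if c == "a" else b for c in pattern)
--     return rebuilt == value and a != b
-- ===== Notes on version B (the rewrite author's own statement) =====
-- stated objective: alternative
-- what changed: The inner char-by-char incremental compare-with-break is replaced by a two-phase check (one pass extracting the two candidate substitutions at their first occurrences, then rebuilding the whole string from them and comparing once), and the admissible (len_a, len_b) pairs are precomputed by a separate helper instead of guard/continue logic inside the loop.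
import Mathlib
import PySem

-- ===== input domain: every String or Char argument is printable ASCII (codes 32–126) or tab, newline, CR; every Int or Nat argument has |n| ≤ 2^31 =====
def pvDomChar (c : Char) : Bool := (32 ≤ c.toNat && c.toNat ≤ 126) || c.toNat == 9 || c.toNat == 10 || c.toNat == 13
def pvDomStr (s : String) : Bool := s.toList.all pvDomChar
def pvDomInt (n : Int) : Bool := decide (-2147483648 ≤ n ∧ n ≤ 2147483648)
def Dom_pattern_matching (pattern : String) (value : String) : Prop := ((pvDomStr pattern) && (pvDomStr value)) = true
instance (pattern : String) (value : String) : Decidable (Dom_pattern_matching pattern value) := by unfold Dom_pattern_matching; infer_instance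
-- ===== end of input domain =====

-- B replaces A's incremental compare-with-break inner loop by a two-phase check
-- (extract the two candidate substitutions, then rebuild the whole string and
-- compare once) and precomputes the admissible (len_a, len_b) pairs; same cost.

-- ===== PORT A =====
-- value[pos:pos+len] for 0 ≤ pos, 0 ≤ len: exactly (drop pos).take len
-- (all positions/lengths in this program are provably nonnegative, so Nat is exact)
def pvSliceA (v : List Char) (pos len : Nat) : List Char := (v.drop pos).take len

-- the inner `for ch in pattern` loop of A; the trailing `ok and a != b` check is
-- folded into the base case (on break the result is False either way)
def pmInnerA (v : List Char) (la lb : Nat) :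
    List Char → Nat → Option (List Char) → Option (List Char) → Bool
  | [], _, a, b => decide (a ≠ b)
  | c :: r, pos, a, b =>
    if c = 'a' then
      match a with
      | none => pmInnerA v la lb r (pos + la) (some (pvSliceA v pos la)) b
      | some s => if pvSliceA v pos la = s then pmInnerA v la lb r (pos + la) (some s) b else false
    else
      match b with
      | none => pmInnerA v la lb r (pos + lb) a (some (pvSliceA v pos lb))
      | some s => if pvSliceA v pos lb = s then pmInnerA v la lb r (pos + lb) a (some s) else false

-- the `for len_a in range(0, n // count_a + 1)` loop with continue / early return;
-- rest = n - count_a*len_a is ≥ 0 for every len_a in the range, so Nat `-` is exact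
def pmLoopA (p v : List Char) (cA cB n : Nat) : List Nat → Bool
  | [] => false
  | la :: rest =>
    let r := n - cA * la
    if cB = 0 then
      if r ≠ 0 then pmLoopA p v cA cB n rest
      else if pmInnerA v la 0 p 0 none none then true else pmLoopA p v cA cB n rest
    else
      if r % cB ≠ 0 then pmLoopA p v cA cB n rest
      else if pmInnerA v la (r / cB) p 0 none none then true else pmLoopA p v cA cB n rest

-- body after the `count_a < count_b` swap; the swap recursion bottoms out after one
-- step (the swapped pattern always has count_a ≥ count_b), so it is unrolled below
def pmCoreA (p v : List Char) : Bool :=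
  let cA := p.count 'a'
  let cB := p.count 'b'
  if v = [] then decide (cB = 0)
  else pmLoopA p v cA cB v.length (List.range (v.length / cA + 1))

def pmSwapA (p : List Char) : List Char := p.map fun c => if c = 'a' then 'b' else 'a'

def pattern_matching (pattern : String) (value : String) : Bool :=
  let p := pattern.toList
  let v := value.toList
  if p = [] then decide (v = [])
  else if p.count 'a' < p.count 'b' then pmCoreA (pmSwapA p) v
  else pmCoreA p v

-- ===== PORT B =====
def pvSliceB (v : List Char) (pos len : Nat) : List Char := (v.drop pos).take len

-- _length_pairs: the (len_a, len_b) splits of n compatible with the two counts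
def altPairs (n cA cB : Nat) : List (Nat × Nat) :=
  (List.range (n / cA + 1)).filterMap fun la =>
    let r := n - cA * la
    if cB = 0 then (if r = 0 then some (la, 0) else none)
    else if r % cB = 0 then some (la, r / cB) else none

-- pass 1 of _fits: extract the candidate substitutions at the first occurrences
def altExtract (v : List Char) (la lb : Nat) :
    List Char → Nat → Option (List Char) → Option (List Char) →
    Option (List Char) × Option (List Char)
  | [], _, a, b => (a, b)
  | c :: r, pos, a, b =>
    if c = 'a' then
      altExtract v la lb r (pos + la) (if a = none then some (pvSliceB v pos la) else a) b
    else
      altExtract v la lb r (pos + lb) a (if b = none then some (pvSliceB v pos lb) else b)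

-- pass 2 of _fits: rebuild the whole string from the candidates
-- (a candidate is `some _` whenever Python's join uses it, so getD [] is exact there)
def altRebuild (a b : Option (List Char)) (p : List Char) : List Char :=
  p.flatMap fun c => if c = 'a' then a.getD [] else b.getD []

def altFits (p v : List Char) (la lb : Nat) : Bool :=
  let e := altExtract v la lb p 0 none none
  decide (altRebuild e.1 e.2 p = v ∧ e.1 ≠ e.2)

def altCore (p v : List Char) : Bool :=
  let cA := p.count 'a'
  let cB := p.count 'b'
  if v = [] then decide (cB = 0)
  else (altPairs v.length cA cB).any fun q => altFits p v q.1 q.2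

def altFlip (p : List Char) : List Char := p.map fun c => if c = 'a' then 'b' else 'a'

def pattern_matching_alt (pattern : String) (value : String) : Bool :=
  let p := pattern.toList
  let v := value.toList
  if p = [] then decide (v = [])
  else if p.count 'a' < p.count 'b' then altCore (altFlip p) v
  else altCore p v

-- ===== PRECONDITION & SPEC =====
-- Pre_ excludes exactly the inputs where Python A raises ZeroDivisionError
-- (nonempty pattern without 'a' and 'b', nonempty value); B raises there too.
def Pre_pattern_matching (pattern : String) (value : String) : Prop :=
  pattern.toList = [] ∨ value.toList = [] ∨
    pattern.toList.count 'a' ≠ 0 ∨ pattern.toList.count 'b' ≠ 0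
instance (pattern : String) (value : String) : Decidable (Pre_pattern_matching pattern value) := by
  unfold Pre_pattern_matching; infer_instance

def pvWitness_pattern_matching : String × String := ("aab", "xxy")

def Spec_pattern_matching (pattern : String) (value : String) (out : Bool) : Prop := out = pattern_matching_alt pattern value
instance (pattern : String) (value : String) (out : Bool) : Decidable (Spec_pattern_matching pattern value out) := by unfold Spec_pattern_matching; infer_instance

-- ===== CLAIM (what is proved, stated in full; the proofs are below) =====
def Claim_equal_pattern_matching : Prop := ∀ (pattern : String) (value : String), Dom_pattern_matching pattern value → Pre_pattern_matching pattern value → Spec_pattern_matching pattern value (pattern_matching pattern value)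

-- ===== LEMMAS AND PROOFS =====

-- A's inner loop decomposed: the all-slices-match check, separated from the candidates
def pmChk (v : List Char) (la lb : Nat) :
    List Char → Nat → Option (List Char) → Option (List Char) → Bool
  | [], _, _, _ => true
  | c :: r, pos, a, b =>
    if c = 'a' then
      match a with
      | none => pmChk v la lb r (pos + la) (some (pvSliceA v pos la)) b
      | some s => (decide (pvSliceA v pos la = s)) && pmChk v la lb r (pos + la) (some s) b
    else
      match b with
      | none => pmChk v la lb r (pos + lb) a (some (pvSliceA v pos lb))
      | some s => (decide (pvSliceA v pos lb = s)) && pmChk v la lb r (pos + lb) a (some s)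

-- nominal length consumed by the walk
def pmNom (la lb : Nat) : List Char → Nat
  | [] => 0
  | c :: r => (if c = 'a' then la else lb) + pmNom la lb r

theorem sliceB_eq_A (v : List Char) (pos len : Nat) :
    pvSliceB v pos len = pvSliceA v pos len := rfl

theorem take_telescope (v : List Char) (pos l m : Nat) :
    (v.drop pos).take (l + m) = (v.drop pos).take l ++ (v.drop (pos + l)).take m := by
  rw [List.take_add, List.drop_drop]

theorem extract_fst_some (v : List Char) (la lb : Nat) :
    ∀ (r : List Char) (pos : Nat) (s : List Char) (b : Option (List Char)),
      (altExtract v la lb r pos (some s) b).1 = some s := by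
  intro r
  induction r with
  | nil => intro pos s b; rfl
  | cons c r ih =>
    intro pos s b
    by_cases h : c = 'a' <;> simp [altExtract, h, ih]

theorem extract_snd_some (v : List Char) (la lb : Nat) :
    ∀ (r : List Char) (pos : Nat) (a : Option (List Char)) (s : List Char),
      (altExtract v la lb r pos a (some s)).2 = some s := by
  intro r
  induction r with
  | nil => intro pos a s; rfl
  | cons c r ih =>
    intro pos a s
    by_cases h : c = 'a' <;> simp [altExtract, h, ih]

theorem innerA_eq_chk (v : List Char) (la lb : Nat) :
    ∀ (r : List Char) (pos : Nat) (a b : Option (List Char)),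
      pmInnerA v la lb r pos a b =
        (pmChk v la lb r pos a b &&
          decide ((altExtract v la lb r pos a b).1 ≠ (altExtract v la lb r pos a b).2)) := by
  intro r
  induction r with
  | nil => intro pos a b; simp [pmInnerA, pmChk, altExtract]
  | cons c r ih =>
    intro pos a b
    by_cases h : c = 'a'
    · cases a with
      | none => simp [pmInnerA, pmChk, altExtract, h, ih, sliceB_eq_A]
      | some s =>
        by_cases hs : pvSliceA v pos la = s <;>
          simp [pmInnerA, pmChk, altExtract, h, hs, ih, sliceB_eq_A]
    · cases b with
      | none => simp [pmInnerA, pmChk, altExtract, h, ih, sliceB_eq_A]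
      | some s =>
        by_cases hs : pvSliceA v pos lb = s <;>
          simp [pmInnerA, pmChk, altExtract, h, hs, ih, sliceB_eq_A]

theorem chk_rebuild (v : List Char) (la lb : Nat) :
    ∀ (r : List Char) (pos : Nat) (a b : Option (List Char)),
      pmChk v la lb r pos a b = true →
      altRebuild (altExtract v la lb r pos a b).1 (altExtract v la lb r pos a b).2 r =
        (v.drop pos).take (pmNom la lb r) := by
  intro r
  induction r with
  | nil => intro pos a b _; simp [altRebuild, pmNom]
  | cons c r ih =>
    intro pos a b hchk
    by_cases h : c = 'a'
    · cases a with
      | none =>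
        simp only [pmChk] at hchk; simp only [h, reduceIte] at hchk
        have hrec := ih (pos + la) (some (pvSliceA v pos la)) b hchk
        have hE : altExtract v la lb (c :: r) pos none b =
            altExtract v la lb r (pos + la) (some (pvSliceA v pos la)) b := by
          simp [altExtract, h, sliceB_eq_A]
        rw [hE, show pmNom la lb (c :: r) = la + pmNom la lb r from by simp [pmNom, h],
          take_telescope, ← hrec]
        simp only [altRebuild, List.flatMap_cons, h, reduceIte, extract_fst_some,
          Option.getD_some]
        simp [pvSliceA]
      | some s =>
        simp only [pmChk] at hchk
        simp only [h, reduceIte, Bool.and_eq_true, decide_eq_true_eq] at hchk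
        obtain ⟨hs, hchk⟩ := hchk
        have hrec := ih (pos + la) (some s) b hchk
        have hE : altExtract v la lb (c :: r) pos (some s) b =
            altExtract v la lb r (pos + la) (some s) b := by
          simp [altExtract, h]
        rw [hE, show pmNom la lb (c :: r) = la + pmNom la lb r from by simp [pmNom, h],
          take_telescope, ← hrec]
        simp only [altRebuild, List.flatMap_cons, h, reduceIte, extract_fst_some,
          Option.getD_some]
        simp [pvSliceA] at hs
        simp [hs]
    · cases b with
      | none =>
        simp only [pmChk] at hchk; simp only [h, reduceIte, if_neg h] at hchk
        have hrec := ih (pos + lb) a (some (pvSliceA v pos lb)) hchk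
        have hE : altExtract v la lb (c :: r) pos a none =
            altExtract v la lb r (pos + lb) a (some (pvSliceA v pos lb)) := by
          simp [altExtract, h, sliceB_eq_A]
        rw [hE, show pmNom la lb (c :: r) = lb + pmNom la lb r from by simp [pmNom, h],
          take_telescope, ← hrec]
        simp only [altRebuild, List.flatMap_cons, h, reduceIte, if_neg h, extract_snd_some,
          Option.getD_some]
        simp [pvSliceA]
      | some s =>
        simp only [pmChk] at hchk
        simp only [h, reduceIte, if_neg h, Bool.and_eq_true, decide_eq_true_eq] at hchk
        obtain ⟨hs, hchk⟩ := hchk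
        have hrec := ih (pos + lb) a (some s) hchk
        have hE : altExtract v la lb (c :: r) pos a (some s) =
            altExtract v la lb r (pos + lb) a (some s) := by
          simp [altExtract, h]
        rw [hE, show pmNom la lb (c :: r) = lb + pmNom la lb r from by simp [pmNom, h],
          take_telescope, ← hrec]
        simp only [altRebuild, List.flatMap_cons, h, reduceIte, if_neg h, extract_snd_some,
          Option.getD_some]
        simp [pvSliceA] at hs
        simp [hs]

theorem rebuild_chk (v : List Char) (la lb : Nat) :
    ∀ (r : List Char) (pos : Nat) (a b : Option (List Char)),
      (∀ s, a = some s → ∃ q, q ≤ pos ∧ s = pvSliceA v q la) →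
      (∀ s, b = some s → ∃ q, q ≤ pos ∧ s = pvSliceA v q lb) →
      altRebuild (altExtract v la lb r pos a b).1 (altExtract v la lb r pos a b).2 r =
        (v.drop pos).take (pmNom la lb r) →
      pmChk v la lb r pos a b = true := by
  intro r
  induction r with
  | nil => intro pos a b _ _ _; rfl
  | cons c r ih =>
    intro pos a b ha hb hyp
    by_cases h : c = 'a'
    · cases a with
      | none =>
        have hE : altExtract v la lb (c :: r) pos none b =
            altExtract v la lb r (pos + la) (some (pvSliceA v pos la)) b := by
          simp [altExtract, h, sliceB_eq_A]
        rw [hE, show pmNom la lb (c :: r) = la + pmNom la lb r from by simp [pmNom, h],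
          take_telescope] at hyp
        simp only [altRebuild, List.flatMap_cons, h, reduceIte, extract_fst_some,
          Option.getD_some, pvSliceA] at hyp
        have hyp' := List.append_cancel_left hyp
        simp only [pmChk, h, reduceIte]
        refine ih (pos + la) (some (pvSliceA v pos la)) b ?_ ?_ ?_
        · intro s hs
          exact ⟨pos, Nat.le_add_right _ _, by injection hs with hs; exact hs.symm⟩
        · intro s hs
          obtain ⟨q, hq, hsq⟩ := hb s hs
          exact ⟨q, le_trans hq (Nat.le_add_right _ _), hsq⟩
        · simpa [altRebuild, hE, extract_fst_some, extract_snd_some, Option.getD_some, pvSliceA] using hyp'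
      | some s =>
        obtain ⟨q, hq, hsq⟩ := ha s rfl
        have hE : altExtract v la lb (c :: r) pos (some s) b =
            altExtract v la lb r (pos + la) (some s) b := by
          simp [altExtract, h]
        rw [hE, show pmNom la lb (c :: r) = la + pmNom la lb r from by simp [pmNom, h],
          take_telescope] at hyp
        simp only [altRebuild, List.flatMap_cons, h, reduceIte, extract_fst_some,
          Option.getD_some] at hyp
        -- lengths
        have hleneq := congrArg List.length hyp
        simp only [List.length_append, List.length_take, List.length_drop] at hleneq
        have hslen : s.length = min la (v.length - q) := by
          simp [hsq, pvSliceA]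
        have hlen : s.length = ((v.drop pos).take la).length := by
          simp only [List.length_take, List.length_drop]
          omega
        obtain ⟨hpre, hsuf⟩ := List.append_inj hyp hlen
        simp only [pmChk, h, reduceIte, Bool.and_eq_true, decide_eq_true_eq]
        refine ⟨by simpa [pvSliceA] using hpre.symm, ?_⟩
        refine ih (pos + la) (some s) b ?_ ?_ ?_
        · intro s' hs'
          exact ⟨q, le_trans hq (Nat.le_add_right _ _), by injection hs' with hs'; exact hs' ▸ hsq⟩
        · intro s' hs'
          obtain ⟨q', hq', hsq'⟩ := hb s' hs'
          exact ⟨q', le_trans hq' (Nat.le_add_right _ _), hsq'⟩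
        · simpa [altRebuild, hE, extract_fst_some, extract_snd_some, Option.getD_some, pvSliceA] using hsuf
    · cases b with
      | none =>
        have hE : altExtract v la lb (c :: r) pos a none =
            altExtract v la lb r (pos + lb) a (some (pvSliceA v pos lb)) := by
          simp [altExtract, h, sliceB_eq_A]
        rw [hE, show pmNom la lb (c :: r) = lb + pmNom la lb r from by simp [pmNom, h],
          take_telescope] at hyp
        simp only [altRebuild, List.flatMap_cons, h, reduceIte, if_neg h, extract_snd_some,
          Option.getD_some, pvSliceA] at hyp
        have hyp' := List.append_cancel_left hyp
        simp only [pmChk, h, reduceIte, if_neg h]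
        refine ih (pos + lb) a (some (pvSliceA v pos lb)) ?_ ?_ ?_
        · intro s hs
          obtain ⟨q, hq, hsq⟩ := ha s hs
          exact ⟨q, le_trans hq (Nat.le_add_right _ _), hsq⟩
        · intro s hs
          exact ⟨pos, Nat.le_add_right _ _, by injection hs with hs; exact hs.symm⟩
        · simpa [altRebuild, hE, extract_fst_some, extract_snd_some, Option.getD_some, pvSliceA] using hyp'
      | some s =>
        obtain ⟨q, hq, hsq⟩ := hb s rfl
        have hE : altExtract v la lb (c :: r) pos a (some s) =
            altExtract v la lb r (pos + lb) a (some s) := by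
          simp [altExtract, h]
        rw [hE, show pmNom la lb (c :: r) = lb + pmNom la lb r from by simp [pmNom, h],
          take_telescope] at hyp
        simp only [altRebuild, List.flatMap_cons, h, reduceIte, if_neg h, extract_snd_some,
          Option.getD_some] at hyp
        have hleneq := congrArg List.length hyp
        simp only [List.length_append, List.length_take, List.length_drop] at hleneq
        have hslen : s.length = min lb (v.length - q) := by
          simp [hsq, pvSliceA]
        have hlen : s.length = ((v.drop pos).take lb).length := by
          simp only [List.length_take, List.length_drop]
          omega
        obtain ⟨hpre, hsuf⟩ := List.append_inj hyp hlen
        simp only [pmChk, h, reduceIte, if_neg h, Bool.and_eq_true, decide_eq_true_eq]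
        refine ⟨by simpa [pvSliceA] using hpre.symm, ?_⟩
        refine ih (pos + lb) a (some s) ?_ ?_ ?_
        · intro s' hs'
          obtain ⟨q', hq', hsq'⟩ := ha s' hs'
          exact ⟨q', le_trans hq' (Nat.le_add_right _ _), hsq'⟩
        · intro s' hs'
          exact ⟨q, le_trans hq (Nat.le_add_right _ _), by injection hs' with hs'; exact hs' ▸ hsq⟩
        · simpa [altRebuild, hE, extract_fst_some, extract_snd_some, Option.getD_some, pvSliceA] using hsuf

theorem nom_ge (la lb : Nat) :
    ∀ p : List Char, p.count 'a' * la + p.count 'b' * lb ≤ pmNom la lb p := by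
  intro p
  induction p with
  | nil => simp [pmNom]
  | cons c r ih =>
    by_cases h : c = 'a'
    · simp [pmNom, h, List.count_cons]
      nlinarith
    · by_cases h' : c = 'b' <;>
        simp [pmNom, h, h', List.count_cons] <;> nlinarith

theorem inner_eq_fits (p v : List Char) (la lb : Nat)
    (H : v.length = p.count 'a' * la + p.count 'b' * lb) :
    pmInnerA v la lb p 0 none none = altFits p v la lb := by
  have hnom : v.length ≤ pmNom la lb p := by rw [H]; exact nom_ge la lb p
  have htake : (v.drop 0).take (pmNom la lb p) = v := by
    simp [List.take_of_length_le hnom]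
  rw [innerA_eq_chk]
  unfold altFits
  have hiff : pmChk v la lb p 0 none none =
      decide (altRebuild (altExtract v la lb p 0 none none).1
        (altExtract v la lb p 0 none none).2 p = v) := by
    by_cases hc : pmChk v la lb p 0 none none = true
    · rw [hc]
      have := chk_rebuild v la lb p 0 none none hc
      rw [htake] at this
      simp [this]
    · rw [Bool.not_eq_true] at hc
      rw [hc]
      symm
      rw [decide_eq_false_iff_not]
      intro hre
      have := rebuild_chk v la lb p 0 none none (by simp) (by simp)
        (by rw [htake]; exact hre)
      rw [hc] at this
      exact Bool.false_ne_true this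
  rw [hiff]
  simp

-- the filterMap body of altPairs, named so the loop lemma can rewrite with it
def pvF (p v : List Char) (la : Nat) : Option (Nat × Nat) :=
  let r := v.length - p.count 'a' * la
  if p.count 'b' = 0 then (if r = 0 then some (la, 0) else none)
  else if r % p.count 'b' = 0 then some (la, r / p.count 'b') else none

theorem loop_eq (p v : List Char) :
    ∀ ls : List Nat, (∀ la ∈ ls, p.count 'a' * la ≤ v.length) →
      pmLoopA p v (p.count 'a') (p.count 'b') v.length ls =
        ((ls.filterMap (pvF p v)).any fun q => altFits p v q.1 q.2) := by
  intro ls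
  induction ls with
  | nil => intro _; rfl
  | cons la ls ih =>
    intro hbound
    have hle : p.count 'a' * la ≤ v.length := hbound la (List.mem_cons_self ..)
    have ihh := ih (fun la' h => hbound la' (List.mem_cons_of_mem _ h))
    by_cases h0 : p.count 'b' = 0
    · by_cases hr : v.length - p.count 'a' * la = 0
      · have H : v.length = p.count 'a' * la + p.count 'b' * 0 := by rw [h0]; omega
        have hfit := inner_eq_fits p v la 0 H
        have hf : pvF p v la = some (la, 0) := by simp [pvF, h0, hr]
        rw [List.filterMap_cons_some hf, List.any_cons]
        cases hfits : altFits p v la 0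
        · rw [← ihh]
          simp [pmLoopA, h0, hr, hfit, hfits]
        · simp [pmLoopA, h0, hr, hfit, hfits]
      · have hf : pvF p v la = none := by simp [pvF, h0, hr]
        rw [List.filterMap_cons_none hf, ← ihh]
        simp [pmLoopA, h0, hr]
    · by_cases hm : (v.length - p.count 'a' * la) % p.count 'b' = 0
      · have hdvd : p.count 'b' ∣ (v.length - p.count 'a' * la) := Nat.dvd_of_mod_eq_zero hm
        have H : v.length =
            p.count 'a' * la + p.count 'b' * ((v.length - p.count 'a' * la) / p.count 'b') := by
          rw [Nat.mul_div_cancel' hdvd]; omega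
        have hfit := inner_eq_fits p v la _ H
        have hf : pvF p v la = some (la, (v.length - p.count 'a' * la) / p.count 'b') := by
          simp [pvF, h0, hm]
        rw [List.filterMap_cons_some hf, List.any_cons]
        cases hfits : altFits p v la ((v.length - p.count 'a' * la) / p.count 'b')
        · rw [← ihh]
          simp [pmLoopA, h0, hm, hfit, hfits]
        · simp [pmLoopA, h0, hm, hfit, hfits]
      · have hf : pvF p v la = none := by simp [pvF, h0, hm]
        rw [List.filterMap_cons_none hf, ← ihh]
        simp [pmLoopA, h0, hm]

theorem core_eq (p v : List Char) : pmCoreA p v = altCore p v := by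
  unfold pmCoreA altCore altPairs
  by_cases hv : v = []
  · simp [hv]
  · simp only [if_neg hv]
    have : (fun la => (let r := v.length - p.count 'a' * la;
        if p.count 'b' = 0 then (if r = 0 then some (la, 0) else none)
        else if r % p.count 'b' = 0 then some (la, r / p.count 'b') else none)) = pvF p v := rfl
    rw [this]
    apply loop_eq
    intro la hla
    have h1 : la ≤ v.length / p.count 'a' := by
      have := List.mem_range.mp hla
      omega
    have h2 : p.count 'a' * la ≤ p.count 'a' * (v.length / p.count 'a') :=
      Nat.mul_le_mul_left _ h1
    have h3 : p.count 'a' * (v.length / p.count 'a') ≤ v.length := by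
      rw [Nat.mul_comm]
      exact Nat.div_mul_le_self _ _
    exact le_trans h2 h3

theorem pm_eq (pattern value : String) :
    pattern_matching pattern value = pattern_matching_alt pattern value := by
  simp only [pattern_matching, pattern_matching_alt]
  split_ifs
  · rfl
  · exact core_eq _ _
  · exact core_eq _ _

-- ===== VERDICT (by name: the statement is the Claim_ definition above) =====
theorem pattern_matching_spec : Claim_equal_pattern_matching := by
  intro pattern value _ _
  unfold Spec_pattern_matching
  exact pm_eq pattern value
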